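-- pv_equiv track=rewrite | github.com/RainRat/diff2typo | multitool.py | classify_typo
-- ===== SOURCE A (Python) =====
-- def classify_typo(typo: str, correction: str, adj_keys: dict[str, set[str]]) -> str:
--     """
--     Groups a typo based on its relationship to the correction.
--     Returns a code: [K] Keyboard, [T] Transposition, [D] Deletion, [I] Insertion, [R] Replacement, [M] Multiple letters.
--     """
--     if not typo or not correction or typo == correction:
--         return "[?]"
--
--     t_len, c_len = len(typo), len(correction)
--     len_diff = t_len - c_len
--
--     # Handle same-length operations (Transposition, Keyboard, Replacement)
--     if len_diff == 0:
--         diffs = [i for i in range(t_len) if typo[i] != correction[i]]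
--         # 1. Transposition [T]
--         if len(diffs) == 2 and diffs[1] == diffs[0] + 1:
--             i, j = diffs
--             if typo[i] == correction[j] and typo[j] == correction[i]:
--                 return "[T]"
--         # 4. Replacement [R] or [K]
--         if len(diffs) == 1:
--             idx = diffs[0]
--             t_char, c_char = typo[idx].lower(), correction[idx].lower()
--             if t_char in adj_keys.get(c_char, set()):
--                 return "[K]"
--             return "[R]"
--
--         return "[M]"
--
--     # 2. Deletion [D] - Typo is shorter (a character was removed)
--     if len_diff == -1:
--         for i in range(c_len):
--             if correction[:i] + correction[i+1:] == typo:
--                 return "[D]"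
--         return "[M]"
--
--     # 3. Insertion [I] - Typo is longer (a character was added)
--     if len_diff == 1:
--         for i in range(t_len):
--             if typo[:i] + typo[i+1:] == correction:
--                 return "[I]"
--         return "[M]"
--
--     # 5. Multiple letters [M] - Fallback for any other length difference or non-match
--     return "[M]"
-- ===== SOURCE B (Python) =====
-- def _mismatch(a: str, b: str) -> int:
--     """First index where a and b differ (min(len(a), len(b)) if one is a prefix of the other)."""
--     i = 0
--     n = min(len(a), len(b))
--     while i < n and a[i] == b[i]:
--         i += 1
--     return i
--
--
-- def classify_typo(typo: str, correction: str, adj_keys: dict[str, set[str]]) -> str: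
--     """
--     Groups a typo based on its relationship to the correction.
--     Returns a code: [K] Keyboard, [T] Transposition, [D] Deletion, [I] Insertion, [R] Replacement, [M] Multiple letters.
--     """
--     if not typo or not correction or typo == correction:
--         return "[?]"
--
--     d = len(typo) - len(correction)
--
--     if d == 0:
--         i = _mismatch(typo, correction)
--         j = len(typo) - 1 - _mismatch(typo[::-1], correction[::-1])
--         if i == j:
--             # single differing position: Keyboard-adjacent or plain Replacement
--             if typo[i].lower() in adj_keys.get(correction[i].lower(), set()):
--                 return "[K]"
--             return "[R]"
--         if j == i + 1 and typo[i] == correction[j] and typo[j] == correction[i]: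
--             return "[T]"
--         return "[M]"
--
--     if d != 1 and d != -1:
--         return "[M]"
--
--     longer, shorter = (correction, typo) if d == -1 else (typo, correction)
--     i = _mismatch(longer, shorter)
--     if longer[i + 1:] == shorter[i:]:
--         return "[D]" if d == -1 else "[I]"
--     return "[M]"
-- ===== Notes on version B (the rewrite author's own statement) =====
-- stated objective: alternative
-- what changed: Replaces A's scans over all candidate edit positions (a slice rebuilt at every position for deletion/insertion, and a full diff-index list for same length) by a single first/last-mismatch computation with one aligned suffix comparison.
import Mathlib
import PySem

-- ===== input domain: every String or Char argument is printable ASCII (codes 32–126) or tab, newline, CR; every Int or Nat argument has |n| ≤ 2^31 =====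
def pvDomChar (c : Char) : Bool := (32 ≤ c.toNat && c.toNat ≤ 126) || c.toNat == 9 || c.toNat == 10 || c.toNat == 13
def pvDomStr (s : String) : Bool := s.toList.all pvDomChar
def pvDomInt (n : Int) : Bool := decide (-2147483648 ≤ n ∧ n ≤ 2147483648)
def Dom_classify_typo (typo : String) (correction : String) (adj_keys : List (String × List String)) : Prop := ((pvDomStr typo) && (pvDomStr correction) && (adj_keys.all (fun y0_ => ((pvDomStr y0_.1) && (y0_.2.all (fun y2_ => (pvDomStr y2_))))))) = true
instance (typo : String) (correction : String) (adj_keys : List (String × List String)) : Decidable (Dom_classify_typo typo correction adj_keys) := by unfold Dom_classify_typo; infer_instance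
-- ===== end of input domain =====

-- B classifies the edit from the first and last mismatch positions with one aligned suffix
-- comparison, instead of A's scan over all candidate edit positions; same return value everywhere.

-- ===== PORT A =====
-- A's same-length diff-position comprehension: [i for i in range(t_len) if typo[i] != correction[i]]
def diffsA (tl cl : List Char) : List Int :=
  (PySem.List.pyRange 0 (tl.length : Int) 1).filter
    (fun i => PySem.List.pyGet? tl i != PySem.List.pyGet? cl i)

-- A's len_diff == 0 branch (Transposition / Keyboard / Replacement / Multiple)
def sameLenA (tl cl : List Char) (adj_keys : List (String × List String)) : String :=
  let diffs := diffsA tl cl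
  if diffs.length = 2 ∧ PySem.List.pyGetD diffs 1 0 = PySem.List.pyGetD diffs 0 0 + 1 ∧
      PySem.List.pyGet? tl (PySem.List.pyGetD diffs 0 0) = PySem.List.pyGet? cl (PySem.List.pyGetD diffs 1 0) ∧
      PySem.List.pyGet? tl (PySem.List.pyGetD diffs 1 0) = PySem.List.pyGet? cl (PySem.List.pyGetD diffs 0 0)
  then "[T]"
  else if diffs.length = 1 then
    let idx := PySem.List.pyGetD diffs 0 0
    let t_char := PySem.Str.lower (String.ofList [PySem.List.pyGetD tl idx ' '])
    let c_char := PySem.Str.lower (String.ofList [PySem.List.pyGetD cl idx ' '])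
    if PySem.Set.contains (PySem.Dict.getD (PySem.Dict.mk adj_keys) c_char PySem.Set.empty) t_char
    then "[K]" else "[R]"
  else "[M]"

-- A's deletion/insertion scan: any(L[:i] + L[i+1:] == S for i in range(len(L)))
def delScanA (L S : List Char) : Bool :=
  (PySem.List.pyRange 0 (L.length : Int) 1).any
    (fun i => PySem.List.slice L none (some i) ++ PySem.List.slice L (some (i+1)) none == S)

def classify_typo (typo : String) (correction : String) (adj_keys : List (String × List String)) : String :=
  let tl := typo.toList
  let cl := correction.toList
  if tl = [] ∨ cl = [] ∨ tl = cl then "[?]"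
  else if (tl.length : Int) - (cl.length : Int) = 0 then sameLenA tl cl adj_keys
  else if (tl.length : Int) - (cl.length : Int) = -1 then
    (if delScanA cl tl then "[D]" else "[M]")
  else if (tl.length : Int) - (cl.length : Int) = 1 then
    (if delScanA tl cl then "[I]" else "[M]")
  else "[M]"

-- ===== PORT B =====
-- B's _mismatch helper: first index where the two strings differ (min length if one is a prefix)
def mismatchIdx : List Char → List Char → Nat
  | a :: as, b :: bs => if a = b then mismatchIdx as bs + 1 else 0
  | _, _ => 0

-- B's d == 0 branch: first and last differing positions decide T / K / R / M
def sameLenB (tl cl : List Char) (adj_keys : List (String × List String)) : String :=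
  let i := mismatchIdx tl cl
  let j := tl.length - 1 - mismatchIdx tl.reverse cl.reverse
  if i = j then
    let t_char := PySem.Str.lower (String.ofList [tl.getD i ' '])
    let c_char := PySem.Str.lower (String.ofList [cl.getD i ' '])
    if PySem.Set.contains (PySem.Dict.getD (PySem.Dict.mk adj_keys) c_char PySem.Set.empty) t_char
    then "[K]" else "[R]"
  else if j = i + 1 ∧ tl.getD i ' ' = cl.getD j ' ' ∧ tl.getD j ' ' = cl.getD i ' ' then "[T]"
  else "[M]"

-- B's one-edit check: longer[i+1:] == shorter[i:] at the first mismatch i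
def oneAwayB (L S : List Char) : Bool :=
  decide (L.drop (mismatchIdx L S + 1) = S.drop (mismatchIdx L S))

def classify_typo_alt (typo : String) (correction : String) (adj_keys : List (String × List String)) : String :=
  let tl := typo.toList
  let cl := correction.toList
  if tl = [] ∨ cl = [] ∨ tl = cl then "[?]"
  else
    let d : Int := (tl.length : Int) - (cl.length : Int)
    if d = 0 then sameLenB tl cl adj_keys
    else if d ≠ 1 ∧ d ≠ -1 then "[M]"
    else
      let ls := if d = -1 then (cl, tl) else (tl, cl)
      if oneAwayB ls.1 ls.2 then (if d = -1 then "[D]" else "[I]") else "[M]"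

-- ===== PRECONDITION & SPEC =====
def Spec_classify_typo (typo : String) (correction : String) (adj_keys : List (String × List String)) (out : String) : Prop := out = classify_typo_alt typo correction adj_keys
instance (typo : String) (correction : String) (adj_keys : List (String × List String)) (out : String) : Decidable (Spec_classify_typo typo correction adj_keys out) := by unfold Spec_classify_typo; infer_instance

-- ===== CLAIM (what is proved, stated in full; the proofs are below) =====
def Claim_equal_classify_typo : Prop := ∀ (typo : String) (correction : String) (adj_keys : List (String × List String)), Dom_classify_typo typo correction adj_keys → Spec_classify_typo typo correction adj_keys (classify_typo typo correction adj_keys)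

-- ===== LEMMAS AND PROOFS =====

theorem mismatch_prefix : ∀ (a b : List Char), ∀ k, k < mismatchIdx a b → a[k]? = b[k]?
  | a :: as, b :: bs, k, hk => by
    simp only [mismatchIdx] at hk
    by_cases h : a = b
    · rw [if_pos h] at hk
      cases k with
      | zero => simp [h]
      | succ k =>
        simp only [List.getElem?_cons_succ]
        exact mismatch_prefix as bs k (by omega)
    · simp [h] at hk
  | [], b, k, hk => by simp [mismatchIdx] at hk
  | a :: as, [], k, hk => by simp [mismatchIdx] at hk

theorem mismatch_le_left : ∀ (a b : List Char), mismatchIdx a b ≤ a.length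
  | a :: as, b :: bs => by
    simp only [mismatchIdx]
    split
    · simpa using mismatch_le_left as bs
    · simp
  | [], _ => by simp [mismatchIdx]
  | _ :: _, [] => by simp [mismatchIdx]

theorem mismatch_le_right : ∀ (a b : List Char), mismatchIdx a b ≤ b.length
  | a :: as, b :: bs => by
    simp only [mismatchIdx]
    split
    · simpa using mismatch_le_right as bs
    · simp
  | [], _ => by simp [mismatchIdx]
  | _ :: _, [] => by simp [mismatchIdx]

theorem mismatch_ne : ∀ (a b : List Char), mismatchIdx a b < a.length → mismatchIdx a b < b.length →
    a[mismatchIdx a b]? ≠ b[mismatchIdx a b]?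
  | a :: as, b :: bs, h1, h2 => by
    simp only [mismatchIdx] at *
    by_cases h : a = b
    · rw [if_pos h] at h1 h2 ⊢
      simp only [List.length_cons] at h1 h2
      simpa using mismatch_ne as bs (by omega) (by omega)
    · simp [h]
  | [], b, h1, h2 => by simp at h1
  | a :: as, [], h1, h2 => by simp at h2

theorem mismatch_lt_of_ne : ∀ (a b : List Char), a.length = b.length → a ≠ b → mismatchIdx a b < a.length
  | a :: as, b :: bs, hlen, hne => by
    simp only [mismatchIdx]
    by_cases h : a = b
    · rw [if_pos h]
      subst h
      have hne' : as ≠ bs := by intro h'; exact hne (by rw [h'])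
      simp only [List.length_cons]
      exact Nat.succ_lt_succ (mismatch_lt_of_ne as bs (by simpa using hlen) hne')
    · simp [h]
  | [], [], _, hne => absurd rfl hne
  | [], _ :: _, hlen, _ => by simp at hlen
  | _ :: _, [], hlen, _ => by simp at hlen

theorem take_eq_of_agree (a b : List Char) (m : Nat)
    (h : ∀ k, k < m → a[k]? = b[k]?) : a.take m = b.take m := by
  apply List.ext_getElem?
  intro k
  by_cases hk : k < m
  · rw [List.getElem?_take, List.getElem?_take]
    simp [hk, h k hk]
  · rw [List.getElem?_take, List.getElem?_take]
    simp [hk]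

theorem delete_iff (L S : List Char) (h : L.length = S.length + 1) :
    (∃ k, k < L.length ∧ L.take k ++ L.drop (k+1) = S) ↔
      L.drop (mismatchIdx L S + 1) = S.drop (mismatchIdx L S) := by
  set m := mismatchIdx L S with hm
  have hmS : m ≤ S.length := mismatch_le_right L S
  have hmL : m ≤ L.length := mismatch_le_left L S
  constructor
  · rintro ⟨k, hk, heq⟩
    have hkm : k ≤ m := by
      by_contra hkm
      push_neg at hkm
      have hSm : S[m]? = L[m]? := by
        rw [← heq]
        rw [List.getElem?_append_left (by simp [List.length_take]; omega)]
        rw [List.getElem?_take]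
        simp [hkm]
      exact mismatch_ne L S (by omega) (by omega) (hSm.symm)
    have := congrArg (List.drop m) heq
    rw [List.drop_append] at this
    rw [List.drop_eq_nil_of_le (by simp [List.length_take]; omega)] at this
    simp only [List.length_take, List.nil_append] at this
    rw [List.drop_drop] at this
    rw [← this]
    congr 1
    omega
  · intro hdrop
    refine ⟨m, by omega, ?_⟩
    have htake : L.take m = S.take m :=
      take_eq_of_agree L S m (fun k hk => mismatch_prefix L S k hk)
    rw [htake, hdrop]
    exact List.take_append_drop m S

theorem filter_range_split (p : Nat → Bool) (n m j : Nat) (hmj : m ≤ j) (hjn : j < n)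
    (hpm : p m = true) (_hpj : p j = true)
    (hlow : ∀ k, k < m → p k = false) (hhigh : ∀ k, j < k → p k = false) :
    (List.range n).filter p = m :: (List.range' (m+1) (j - m)).filter p := by
  have h1 : List.range' 0 m ++ List.range' (0+m) (n - m) = List.range' 0 (m + (n - m)) :=
    List.range'_append_1
  rw [Nat.zero_add, show m + (n - m) = n by omega] at h1
  have h2 : List.range' m ((n - m - 1) + 1) = m :: List.range' (m+1) (n - m - 1) :=
    List.range'_succ
  rw [show (n - m - 1) + 1 = n - m by omega] at h2
  have h3 : List.range' (m+1) (j - m) ++ List.range' ((m+1) + (j - m)) (n - j - 1) =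
      List.range' (m+1) ((j - m) + (n - j - 1)) :=
    List.range'_append_1
  rw [show (m+1) + (j - m) = j + 1 by omega, show (j - m) + (n - j - 1) = n - m - 1 by omega] at h3
  rw [List.range_eq_range', ← h1, List.filter_append, h2, ← h3]
  have hlo : (List.range' 0 m).filter p = [] := by
    rw [List.filter_eq_nil_iff]
    intro x hx
    rw [List.mem_range'_1] at hx
    simp [hlow x (by omega)]
  have hhi : (List.range' (j+1) (n - j - 1)).filter p = [] := by
    rw [List.filter_eq_nil_iff]
    intro x hx
    rw [List.mem_range'_1] at hx
    simp [hhigh x (by omega)]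
  rw [hlo]
  simp [List.filter_cons_of_pos hpm, List.filter_append, hhi]

theorem lastMismatch_spec (a b : List Char) (hlen : a.length = b.length) (hne : a ≠ b) :
    a[a.length - 1 - mismatchIdx a.reverse b.reverse]? ≠ b[a.length - 1 - mismatchIdx a.reverse b.reverse]? ∧
    a.length - 1 - mismatchIdx a.reverse b.reverse < a.length ∧
    (∀ k, a.length - 1 - mismatchIdx a.reverse b.reverse < k → a[k]? = b[k]?) := by
  set m' := mismatchIdx a.reverse b.reverse with hm'
  have hrlen : a.reverse.length = b.reverse.length := by simpa using hlen
  have hrne : a.reverse ≠ b.reverse := fun h => hne (List.reverse_injective h)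
  have hm'a : m' < a.reverse.length := mismatch_lt_of_ne _ _ hrlen hrne
  have hm'b : m' < b.reverse.length := by rwa [hrlen] at hm'a
  have hm'a' : m' < a.length := by simpa using hm'a
  have hm'b' : m' < b.length := by simpa using hm'b
  have hnei : a.reverse[m']? ≠ b.reverse[m']? := mismatch_ne _ _ hm'a hm'b
  rw [List.getElem?_reverse hm'a', List.getElem?_reverse hm'b', ← hlen] at hnei
  refine ⟨hnei, by omega, ?_⟩
  intro k hk
  by_cases hka : k < a.length
  · have h1 : a.reverse[a.length - 1 - k]? = b.reverse[a.length - 1 - k]? := by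
      apply mismatch_prefix
      omega
    rw [List.getElem?_reverse (by omega), List.getElem?_reverse (by omega)] at h1
    rw [show a.length - 1 - (a.length - 1 - k) = k by omega,
        show b.length - 1 - (a.length - 1 - k) = k by omega] at h1
    exact h1
  · rw [List.getElem?_eq_none_iff.mpr (by omega), List.getElem?_eq_none_iff.mpr (by omega)]

theorem pyGetD2_zero (a b : Int) : PySem.List.pyGetD [a, b] 0 0 = a := rfl
theorem pyGetD2_one (a b : Int) : PySem.List.pyGetD [a, b] 1 0 = b := rfl

theorem sameLen_eq (tl cl : List Char) (adj : List (String × List String))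
    (hlen : tl.length = cl.length) (hne : tl ≠ cl) :
    sameLenA tl cl adj = sameLenB tl cl adj := by
  unfold sameLenA sameLenB diffsA
  set m := mismatchIdx tl cl with hm
  obtain ⟨hPj, hjn, hhigh⟩ := lastMismatch_spec tl cl hlen hne
  set j := tl.length - 1 - mismatchIdx tl.reverse cl.reverse with hj
  have hmn : m < tl.length := mismatch_lt_of_ne tl cl hlen hne
  have hmcl : m < cl.length := by omega
  have hPm : tl[m]? ≠ cl[m]? := mismatch_ne tl cl hmn hmcl
  have hlow : ∀ k, k < m → tl[k]? = cl[k]? := fun k hk => mismatch_prefix tl cl k hk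
  have hmj : m ≤ j := by
    by_contra hc
    push_neg at hc
    exact hPj (hlow j hc)
  clear_value m j
  have hdiffs : (PySem.List.pyRange 0 ((tl.length : Int)) 1).filter
      (fun i => PySem.List.pyGet? tl i != PySem.List.pyGet? cl i)
      = ((List.range tl.length).filter (fun k => tl[k]? != cl[k]?)).map (fun k : Nat => (k : Int)) := by
    rw [PySem.List.pyRange_zero_natCast, List.filter_map]
    congr 2
    funext k
    simp [Function.comp]
  have hD : (List.range tl.length).filter (fun k => tl[k]? != cl[k]?)
      = m :: (List.range' (m+1) (j - m)).filter (fun k => tl[k]? != cl[k]?) :=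
    filter_range_split _ tl.length m j hmj hjn
      (by simpa using hPm) (by simpa using hPj)
      (fun k hk => by simpa using hlow k hk)
      (fun k hk => by simpa using hhigh k hk)
  rw [hdiffs, hD]
  by_cases hmjeq : m = j
  · have hT : j - m = 0 := by omega
    rw [hT, List.range'_zero, List.filter_nil]
    simp only [List.map_cons, List.map_nil]
    rw [if_neg (by rintro ⟨h2, -⟩; simp at h2)]
    rw [if_pos (by simp)]
    rw [if_pos hmjeq]
    simp only [PySem.List.pyGetD_zero_cons, PySem.List.pyGetD_natCast]
  · by_cases hadj : j = m + 1
    · have hT : j - m = 1 := by omega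
      rw [hT, List.range'_one]
      have hpj' : ((fun k => tl[k]? != cl[k]?) (m+1)) = true := by
        rw [← hadj]; simpa using hPj
      have hfT : List.filter (fun k => tl[k]? != cl[k]?) [m+1] = [m+1] := by
        simp only [List.filter_cons, List.filter_nil, hpj', if_true]
      rw [hfT]
      simp only [List.map_cons, List.map_nil]
      have hjcl : m + 1 < cl.length := by omega
      have hjtl : m + 1 < tl.length := by omega
      have e1 : PySem.List.pyGetD [((m : Nat) : Int), (((m+1 : Nat)) : Int)] 1 0 = ((m+1 : Nat) : Int) :=
        pyGetD2_one _ _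
      have e0 : PySem.List.pyGetD [((m : Nat) : Int), (((m+1 : Nat)) : Int)] 0 0 = ((m : Nat) : Int) :=
        pyGetD2_zero _ _
      have og1 : (PySem.List.pyGet? tl ((m : Nat) : Int) = PySem.List.pyGet? cl (((m+1 : Nat)) : Int))
          ↔ tl.getD m ' ' = cl.getD (m+1) ' ' := by
        simp only [PySem.List.pyGet?_natCast]
        rw [List.getElem?_eq_getElem hmn, List.getElem?_eq_getElem hjcl,
          List.getD_eq_getElem tl ' ' hmn, List.getD_eq_getElem cl ' ' hjcl]
        exact Option.some_inj
      have og2 : (PySem.List.pyGet? tl (((m+1 : Nat)) : Int) = PySem.List.pyGet? cl ((m : Nat) : Int))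
          ↔ tl.getD (m+1) ' ' = cl.getD m ' ' := by
        simp only [PySem.List.pyGet?_natCast]
        rw [List.getElem?_eq_getElem hjtl, List.getElem?_eq_getElem hmcl,
          List.getD_eq_getElem tl ' ' hjtl, List.getD_eq_getElem cl ' ' hmcl]
        exact Option.some_inj
      rw [hadj]
      by_cases hch : tl.getD m ' ' = cl.getD (m+1) ' ' ∧ tl.getD (m+1) ' ' = cl.getD m ' '
      · rw [if_pos ⟨by simp, by rw [e1, e0]; push_cast; ring, og1.mpr hch.1, og2.mpr hch.2⟩]
        rw [if_neg (by omega), if_pos ⟨rfl, hch⟩]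
      · rw [if_neg (by
          rintro ⟨-, -, h1, h2⟩
          exact hch ⟨og1.mp h1, og2.mp h2⟩)]
        rw [if_neg (by simp)]
        rw [if_neg (by omega), if_neg (by rintro ⟨-, hc⟩; exact hch hc)]
    · have hjT : j ∈ (List.range' (m+1) (j - m)).filter (fun k => tl[k]? != cl[k]?) := by
        rw [List.mem_filter, List.mem_range'_1]
        exact ⟨⟨by omega, by omega⟩, by simpa using hPj⟩
      rw [if_neg (by
        rintro ⟨h2, hA, -, -⟩
        simp only [List.length_map, List.length_cons] at h2
        obtain ⟨x, hx⟩ := List.length_eq_one_iff.mp (by omega :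
          ((List.range' (m+1) (j - m)).filter (fun k => tl[k]? != cl[k]?)).length = 1)
        rw [hx] at hjT hA
        have hjx : j = x := by simpa using hjT
        simp only [List.map_cons, List.map_nil] at hA
        rw [pyGetD2_one, pyGetD2_zero] at hA
        have : x = m + 1 := by exact_mod_cast hA
        omega)]
      rw [if_neg (by
        intro h1
        simp only [List.length_map, List.length_cons] at h1
        have : (List.range' (m+1) (j - m)).filter (fun k => tl[k]? != cl[k]?) = [] :=
          List.length_eq_zero_iff.mp (by omega)
        rw [this] at hjT
        simp at hjT)]
      rw [if_neg hmjeq, if_neg (by rintro ⟨hc, -⟩; exact hadj hc)]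

theorem delScan_eq (L S : List Char) (h : L.length = S.length + 1) :
    delScanA L S = oneAwayB L S := by
  unfold delScanA oneAwayB
  rw [PySem.List.pyRange_zero_natCast, List.any_map]
  have hpred : ((fun i => PySem.List.slice L none (some i) ++ PySem.List.slice L (some (i+1)) none == S)
      ∘ (fun (k : Nat) => (k : Int))) = fun k : Nat => decide (L.take k ++ L.drop (k+1) = S) := by
    funext k
    simp only [Function.comp_apply, PySem.List.slice_to_natCast,
      show ((k : Int) + 1) = (((k+1 : Nat) : Int)) by push_cast; ring,
      PySem.List.slice_from_natCast]
    exact Bool.beq_eq_decide_eq _ _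
  rw [hpred, Bool.eq_iff_iff]
  simp only [List.any_eq_true, List.mem_range, decide_eq_true_eq]
  constructor
  · rintro ⟨k, hk, hke⟩
    exact (delete_iff L S h).mp ⟨k, hk, hke⟩
  · intro hd
    obtain ⟨k, hk, hke⟩ := (delete_iff L S h).mpr hd
    exact ⟨k, hk, hke⟩

-- ===== VERDICT (by name: the statement is the Claim_ definition above) =====
theorem classify_typo_spec : Claim_equal_classify_typo := by
  unfold Claim_equal_classify_typo
  intro typo correction adj _dom
  unfold Spec_classify_typo classify_typo classify_typo_alt
  set tl := typo.toList with htl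
  set cl := correction.toList with hcl
  by_cases hg : tl = [] ∨ cl = [] ∨ tl = cl
  · simp only [if_pos hg]
  · simp only [if_neg hg]
    push_neg at hg
    by_cases h0 : (tl.length : Int) - (cl.length : Int) = 0
    · simp only [if_pos h0]
      exact sameLen_eq tl cl adj (by omega) hg.2.2
    · rw [if_neg h0, if_neg h0]
      by_cases hm1 : (tl.length : Int) - (cl.length : Int) = -1
      · rw [if_pos hm1]
        rw [if_neg (show ¬((tl.length : Int) - (cl.length : Int) ≠ 1 ∧
              (tl.length : Int) - (cl.length : Int) ≠ -1) by omega)]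
        rw [if_pos hm1, if_pos hm1]
        rw [delScan_eq cl tl (by omega)]
      · rw [if_neg hm1]
        by_cases hp1 : (tl.length : Int) - (cl.length : Int) = 1
        · rw [if_pos hp1]
          rw [if_neg (show ¬((tl.length : Int) - (cl.length : Int) ≠ 1 ∧
                (tl.length : Int) - (cl.length : Int) ≠ -1) by omega)]
          rw [if_neg hm1, if_neg hm1]
          rw [delScan_eq tl cl (by omega)]
        · rw [if_neg hp1]
          rw [if_pos (show ((tl.length : Int) - (cl.length : Int) ≠ 1 ∧
                (tl.length : Int) - (cl.length : Int) ≠ -1) by exact ⟨hp1, hm1⟩)]
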